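-- pv_equiv track=rewrite | github.com/SilverHelmet/KnowledgeGraph | src/mapping/classify/gen_good_one2one_mapping.py | count_entity
-- ===== SOURCE A (Python) =====
-- def count_entity(baike2fb):
--     bk_cnt = {}
--     fb_cnt = {}
--     for bk_url in baike2fb:
--         for fb_uri in baike2fb[bk_url]:
--             if not bk_url in bk_cnt:
--                 bk_cnt[bk_url] = 0
--             if not fb_uri in fb_cnt:
--                 fb_cnt[fb_uri] = 0
--             bk_cnt[bk_url] += 1
--             fb_cnt[fb_uri] += 1
--     return bk_cnt, fb_cnt
-- ===== SOURCE B (Python) =====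
-- def count_entity(baike2fb):
--     bk_cnt = {bk: len(fbs) for bk, fbs in baike2fb.items() if fbs}
--     fb_cnt = {}
--     for fb in (fb for fbs in baike2fb.values() for fb in fbs):
--         fb_cnt[fb] = fb_cnt.get(fb, 0) + 1
--     return bk_cnt, fb_cnt
-- ===== Notes on version B (the rewrite author's own statement) =====
-- stated objective: simpler
-- what changed: Replaces A's nested loop that increments both counters per element with two independent passes: bk_cnt as a dict comprehension mapping each key with a non-empty list to its length (closed form, no per-element increments), and fb_cnt as one flat counting pass over the concatenated inner lists.
import Mathlib
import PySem

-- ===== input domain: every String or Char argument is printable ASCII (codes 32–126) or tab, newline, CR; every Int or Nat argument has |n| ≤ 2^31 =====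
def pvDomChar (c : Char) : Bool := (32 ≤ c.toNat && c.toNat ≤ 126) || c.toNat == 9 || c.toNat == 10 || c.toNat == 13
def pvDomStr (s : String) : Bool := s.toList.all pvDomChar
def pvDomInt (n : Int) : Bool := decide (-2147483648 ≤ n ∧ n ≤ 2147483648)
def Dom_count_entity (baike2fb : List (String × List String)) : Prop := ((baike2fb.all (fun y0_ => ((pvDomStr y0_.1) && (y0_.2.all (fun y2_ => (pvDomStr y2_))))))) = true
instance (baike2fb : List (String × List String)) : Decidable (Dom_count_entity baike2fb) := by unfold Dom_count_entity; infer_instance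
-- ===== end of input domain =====

-- B computes the two dicts in two separate passes (bk_cnt as a closed-form comprehension of
-- lengths, fb_cnt as one flat counting pass) instead of A's nested loop; objective: simpler.

-- ===== PORT A =====
def count_entity (baike2fb : List (String × List String)) : (List (String × Int)) × (List (String × Int)) :=
  let d : PySem.Dict String (List String) := PySem.Dict.mk baike2fb
  let st :=
    d.keys.foldl (fun st bk_url =>
      ((d.get? bk_url).getD []).foldl (fun st fb_uri =>
        let bk := if st.1.contains bk_url then st.1 else st.1.insert bk_url 0
        let fb := if st.2.contains fb_uri then st.2 else st.2.insert fb_uri 0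
        (bk.insert bk_url (bk.getD bk_url 0 + 1), fb.insert fb_uri (fb.getD fb_uri 0 + 1))) st)
      (PySem.Dict.empty, PySem.Dict.empty)
  (st.1.items, st.2.items)

-- ===== PORT B =====
def count_entity_alt (baike2fb : List (String × List String)) : (List (String × Int)) × (List (String × Int)) :=
  let bk_cnt := (baike2fb.filter (fun p => !p.2.isEmpty)).map (fun p => (p.1, (p.2.length : Int)))
  let fb_cnt := (baike2fb.flatMap (fun p => p.2)).foldl
      (fun d fb => d.insert fb (d.getD fb 0 + 1)) PySem.Dict.empty
  (bk_cnt, fb_cnt.items)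

-- ===== PRECONDITION & SPEC =====
-- Pre_ excludes association lists with duplicate keys, which do not represent a Python dict
-- (A's parameter is a dict, so such inputs cannot occur in Python).
def Pre_count_entity (baike2fb : List (String × List String)) : Prop :=
  (baike2fb.map Prod.fst).Nodup
instance (baike2fb : List (String × List String)) : Decidable (Pre_count_entity baike2fb) := by unfold Pre_count_entity; infer_instance
def pvWitness_count_entity : (List (String × List String)) := [("a", ["x", "y"]), ("b", []), ("c", ["x"])]
def Spec_count_entity (baike2fb : List (String × List String)) (out : (List (String × Int)) × (List (String × Int))) : Prop := out = count_entity_alt baike2fb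
instance (baike2fb : List (String × List String)) (out : (List (String × Int)) × (List (String × Int))) : Decidable (Spec_count_entity baike2fb out) := by unfold Spec_count_entity; infer_instance

-- ===== CLAIM (what is proved, stated in full; the proofs are below) =====
def Claim_equal_count_entity : Prop := ∀ (baike2fb : List (String × List String)), Dom_count_entity baike2fb → Pre_count_entity baike2fb → Spec_count_entity baike2fb (count_entity baike2fb)

-- ===== LEMMAS AND PROOFS =====

-- A's two-step update ("set to 0 if absent, then += 1") is one counting insert.
theorem cnt_step_eq {κ : Type} [BEq κ] [LawfulBEq κ] (c : PySem.Dict κ Int) (k : κ) :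
    (if c.contains k then c else c.insert k 0).insert k
      ((if c.contains k then c else c.insert k 0).getD k 0 + 1)
      = c.insert k (c.getD k 0 + 1) := by
  by_cases h : c.contains k = true
  · simp [h]
  · rw [if_neg h, PySem.Dict.getD_insert_self, PySem.Dict.insert_insert_self,
        PySem.Dict.getD_of_not_contains c 0 (by simpa using h)]

-- Folding a per-pair fold over the second components is folding over the flattened list.
theorem foldl_foldl_eq_foldl_flatMap {α β γ : Type} (g : β → γ → β)
    (l : List (α × List γ)) (b : β) :
    l.foldl (fun b p => p.2.foldl g b) b = (l.flatMap (fun p => p.2)).foldl g b := by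
  induction l generalizing b with
  | nil => rfl
  | cons p l ih => simp [List.foldl_append, ih]

-- Repeating the counting insert once per element of fbs adds fbs.length (no key if fbs = []).
theorem foldl_cnt_const_key {κ : Type} [BEq κ] [LawfulBEq κ]
    (k : κ) (fbs : List κ) (c : PySem.Dict κ Int) (hne : fbs ≠ []) :
    fbs.foldl (fun c (_ : κ) => c.insert k (c.getD k 0 + 1)) c
      = c.insert k (c.getD k 0 + fbs.length) := by
  induction fbs generalizing c with
  | nil => exact absurd rfl hne
  | cons fb fbs ih =>
    by_cases h : fbs = []
    · subst h; simp
    · rw [List.foldl_cons, ih _ h, PySem.Dict.getD_insert_self,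
          PySem.Dict.insert_insert_self, List.length_cons]
      congr 1
      push_cast
      ring

-- The bk-side fold over fresh distinct keys appends exactly the nonempty entries.
theorem bk_fold_items (l : List (String × List String)) (c : PySem.Dict String Int)
    (hnd : (l.map Prod.fst).Nodup) (hfresh : ∀ p ∈ l, c.contains p.1 = false) :
    (l.foldl (fun c p =>
        p.2.foldl (fun c (_ : String) => c.insert p.1 (c.getD p.1 0 + 1)) c) c).items
      = c.items ++ (l.filter (fun p => !p.2.isEmpty)).map (fun p => (p.1, (p.2.length : Int))) := by
  induction l generalizing c with
  | nil => simp
  | cons p l ih =>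
    simp only [List.map_cons, List.nodup_cons] at hnd
    have hc : c.contains p.1 = false := hfresh p (List.mem_cons_self)
    by_cases h2 : p.2 = []
    · rw [List.foldl_cons, h2]
      simp only [List.foldl_nil]
      rw [ih c hnd.2 (fun q hq => hfresh q (List.mem_cons_of_mem _ hq))]
      simp [h2]
    · rw [List.foldl_cons, foldl_cnt_const_key _ _ _ h2,
          PySem.Dict.getD_of_not_contains c 0 hc]
      rw [ih _ hnd.2 ?_]
      · rw [PySem.Dict.items_insert_of_not_contains _ _ hc]
        simp [h2]
      · intro q hq
        rw [PySem.Dict.contains_insert]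
        have hne : ¬ (q.1 = p.1) := by
          intro he
          exact hnd.1 (he ▸ List.mem_map_of_mem hq)
        simp [hne, hfresh q (List.mem_cons_of_mem _ hq)]

-- Under unique keys, iterating keys and looking each one up is iterating the pairs.
theorem keys_fold_eq_pairs_fold {σ : Type} (l : List (String × List String))
    (hnd : (l.map Prod.fst).Nodup)
    (F : σ → String → List String → σ) (st : σ) :
    ((PySem.Dict.mk l).keys.foldl
        (fun st k => F st k (((PySem.Dict.mk l).get? k).getD [])) st)
      = l.foldl (fun st p => F st p.1 p.2) st := by
  have hkeys : (PySem.Dict.mk l).keys = l.map Prod.fst := by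
    simp [PySem.Dict.keys]
  rw [hkeys, List.foldl_map]
  apply PySem.List.foldl_congr_mem
  intro st p hp
  have hg : (PySem.Dict.mk l).get? p.1 = some p.2 :=
    PySem.Dict.get?_of_mem_items (d := PySem.Dict.mk l) (by simpa using hp)
      (by simpa [PySem.Dict.keys] using hnd)
  rw [hg]
  rfl

-- The whole equivalence, stated on the (zeta-reduced) form of A's body.
theorem count_entity_main (l : List (String × List String))
    (hpre : (l.map Prod.fst).Nodup) :
    (let st := (PySem.Dict.mk l).keys.foldl (fun st bk_url =>
        (((PySem.Dict.mk l).get? bk_url).getD []).foldl (fun st fb_uri =>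
          ((if st.1.contains bk_url then st.1 else st.1.insert bk_url 0).insert bk_url
             ((if st.1.contains bk_url then st.1 else st.1.insert bk_url 0).getD bk_url 0 + 1),
           (if st.2.contains fb_uri then st.2 else st.2.insert fb_uri 0).insert fb_uri
             ((if st.2.contains fb_uri then st.2 else st.2.insert fb_uri 0).getD fb_uri 0 + 1))) st)
        ((PySem.Dict.empty : PySem.Dict String Int), (PySem.Dict.empty : PySem.Dict String Int))
     (st.1.items, st.2.items))
    = count_entity_alt l := by
  have step1 :
      ((PySem.Dict.mk l).keys.foldl (fun st bk_url =>
        (((PySem.Dict.mk l).get? bk_url).getD []).foldl (fun st fb_uri =>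
          ((if st.1.contains bk_url then st.1 else st.1.insert bk_url 0).insert bk_url
             ((if st.1.contains bk_url then st.1 else st.1.insert bk_url 0).getD bk_url 0 + 1),
           (if st.2.contains fb_uri then st.2 else st.2.insert fb_uri 0).insert fb_uri
             ((if st.2.contains fb_uri then st.2 else st.2.insert fb_uri 0).getD fb_uri 0 + 1))) st)
        ((PySem.Dict.empty : PySem.Dict String Int), (PySem.Dict.empty : PySem.Dict String Int)))
      = l.foldl (fun st p =>
          p.2.foldl (fun st fb_uri =>
          ((if st.1.contains p.1 then st.1 else st.1.insert p.1 0).insert p.1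
             ((if st.1.contains p.1 then st.1 else st.1.insert p.1 0).getD p.1 0 + 1),
           (if st.2.contains fb_uri then st.2 else st.2.insert fb_uri 0).insert fb_uri
             ((if st.2.contains fb_uri then st.2 else st.2.insert fb_uri 0).getD fb_uri 0 + 1))) st)
        ((PySem.Dict.empty : PySem.Dict String Int), (PySem.Dict.empty : PySem.Dict String Int)) :=
    keys_fold_eq_pairs_fold l hpre
      (fun (st : PySem.Dict String Int × PySem.Dict String Int) (k : String) (fbs : List String) => fbs.foldl (fun st fb_uri =>
          ((if st.1.contains k then st.1 else st.1.insert k 0).insert k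
             ((if st.1.contains k then st.1 else st.1.insert k 0).getD k 0 + 1),
           (if st.2.contains fb_uri then st.2 else st.2.insert fb_uri 0).insert fb_uri
             ((if st.2.contains fb_uri then st.2 else st.2.insert fb_uri 0).getD fb_uri 0 + 1))) st) _
  have step2 :
      (l.foldl (fun st p =>
          p.2.foldl (fun st fb_uri =>
          ((if st.1.contains p.1 then st.1 else st.1.insert p.1 0).insert p.1
             ((if st.1.contains p.1 then st.1 else st.1.insert p.1 0).getD p.1 0 + 1),
           (if st.2.contains fb_uri then st.2 else st.2.insert fb_uri 0).insert fb_uri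
             ((if st.2.contains fb_uri then st.2 else st.2.insert fb_uri 0).getD fb_uri 0 + 1))) st)
        ((PySem.Dict.empty : PySem.Dict String Int), (PySem.Dict.empty : PySem.Dict String Int)))
      = l.foldl (fun st p =>
          ((fun (c : PySem.Dict String Int) (p : String × List String) =>
              p.2.foldl (fun c (_ : String) => c.insert p.1 (c.getD p.1 0 + 1)) c) st.1 p,
           (fun (c : PySem.Dict String Int) (p : String × List String) =>
              p.2.foldl (fun c fb => c.insert fb (c.getD fb 0 + 1)) c) st.2 p))
        ((PySem.Dict.empty : PySem.Dict String Int), (PySem.Dict.empty : PySem.Dict String Int)) := by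
    apply PySem.List.foldl_congr_mem
    intro st p _
    refine Eq.trans (PySem.List.foldl_congr_mem _ _
      (fun (s : PySem.Dict String Int × PySem.Dict String Int) (e : String) =>
        (s.1.insert p.1 (s.1.getD p.1 0 + 1), s.2.insert e (s.2.getD e 0 + 1))) _
      (fun st fb _ => by rw [cnt_step_eq st.1 p.1, cnt_step_eq st.2 fb]))
      (PySem.List.foldl_prod_mk
        (fun c (_ : String) => c.insert p.1 (c.getD p.1 0 + 1))
        (fun c fb => c.insert fb (c.getD fb 0 + 1)) p.2 st.1 st.2)
  have step3 := PySem.List.foldl_prod_mk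
      (fun (c : PySem.Dict String Int) (p : String × List String) =>
          p.2.foldl (fun c (_ : String) => c.insert p.1 (c.getD p.1 0 + 1)) c)
      (fun (c : PySem.Dict String Int) (p : String × List String) =>
          p.2.foldl (fun c fb => c.insert fb (c.getD fb 0 + 1)) c)
      l PySem.Dict.empty PySem.Dict.empty
  have hF := (step1.trans step2).trans step3
  refine Eq.trans (congrArg (fun st : PySem.Dict String Int × PySem.Dict String Int =>
      (st.1.items, st.2.items)) hF) ?_
  unfold count_entity_alt
  refine Prod.ext ?_ ?_
  · simp only []
    rw [bk_fold_items l PySem.Dict.empty hpre (by intro p _; simp)]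
    simp [PySem.Dict.empty]
  · simp only []
    rw [foldl_foldl_eq_foldl_flatMap]

-- ===== VERDICT (by name: the statement is the Claim_ definition above) =====
theorem count_entity_spec : Claim_equal_count_entity := by
  intro l _ hpre
  exact count_entity_main l hpre
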